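-- pv_equiv track=rewrite | github.com/animevietsub/SVG-To-PDF-Converter-Beta-Chrome | main.py | updateRows
-- ===== SOURCE A (Python) =====
-- def updateRows(data):
--     space_array = []
--     o_rows = data
--     i = 0
--     for row in data:
--         if(row ==  " "):
--             space_array.append(i)
--         i += 1
--     space_array.reverse()
--     for pos in space_array:
--         del o_rows[pos]
--     while len(o_rows) < 7:
--         o_rows.append(" ")
--     return  o_rows
-- ===== SOURCE B (Python) =====
-- def updateRows(data):
--     # In-place two-pointer compaction: copy each non-space entry forward,
--     # truncate the leftover tail, then pad to length 7.
--     write = 0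
--     for read in range(len(data)):
--         if data[read] != " ":
--             data[write] = data[read]
--             write += 1
--     del data[write:]
--     while len(data) < 7:
--         data.append(" ")
--     return data
-- ===== Notes on version B (the rewrite author's own statement) =====
-- stated objective: alternative
-- what changed: Replaced A's collect-indices / reverse / per-index del passes with a single two-pointer in-place compaction followed by one tail truncation, keeping the same mutate-and-return behaviour.
import Mathlib
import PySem

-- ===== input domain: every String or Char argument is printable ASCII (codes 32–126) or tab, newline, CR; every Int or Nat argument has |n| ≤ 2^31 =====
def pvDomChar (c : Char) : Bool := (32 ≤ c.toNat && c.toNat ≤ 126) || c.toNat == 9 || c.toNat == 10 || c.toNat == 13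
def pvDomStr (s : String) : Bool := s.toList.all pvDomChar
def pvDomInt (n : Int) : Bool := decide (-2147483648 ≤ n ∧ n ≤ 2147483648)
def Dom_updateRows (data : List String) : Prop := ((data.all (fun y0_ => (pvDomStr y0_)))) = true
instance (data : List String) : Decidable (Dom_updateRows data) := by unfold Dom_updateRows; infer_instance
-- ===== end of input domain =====

-- B mutates the argument list in place exactly as A does (same final contents); the equivalence proved here is about the return value.
-- B replaces A's collect-indices/reverse/per-index-del passes with a single two-pointer compaction pass.

-- shared `while len(l) < 7: l.append(" ")` loop (identical in A and B)
def padTo7 (l : List String) : List String :=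
  if l.length < 7 then padTo7 (l ++ [" "]) else l
termination_by 7 - l.length

-- ===== PORT A =====
-- `del o_rows[pos]` ported as List.eraseIdx: pos is a nonnegative in-range index here, where both agree.
def updateRows (data : List String) : List String :=
  let space_array := (data.foldl (fun (s : List Nat × Nat) row =>
      (if row = " " then s.1 ++ [s.2] else s.1, s.2 + 1)) ([], 0)).1
  let o_rows := space_array.reverse.foldl (fun l pos => l.eraseIdx pos) data
  padTo7 o_rows

-- ===== PORT B =====
-- one compaction step of B's for-loop: if data[read] != " ": data[write] = data[read]; write += 1
def compactStep (s : List String × Nat) (read : Nat) : List String × Nat :=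
  if s.1.getD read "" ≠ " " then (s.1.set s.2 (s.1.getD read ""), s.2 + 1) else s

def updateRows_alt (data : List String) : List String :=
  let s := (List.range data.length).foldl compactStep (data, 0)
  padTo7 (s.1.take s.2)   -- `del data[write:]` = keep the first `write` entries

-- ===== PRECONDITION & SPEC =====
def Spec_updateRows (data : List String) (out : List String) : Prop := out = updateRows_alt data
instance (data : List String) (out : List String) : Decidable (Spec_updateRows data out) := by unfold Spec_updateRows; infer_instance

-- ===== CLAIM (what is proved, stated in full; the proofs are below) =====
def Claim_equal_updateRows : Prop := ∀ (data : List String), Dom_updateRows data → Spec_updateRows data (updateRows data)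

-- ===== LEMMAS AND PROOFS =====

-- indices (from offset i) of the entries equal to " "
def idxSpec : List String → Nat → List Nat
  | [], _ => []
  | x :: xs, i => (if x = " " then [i] else []) ++ idxSpec xs (i + 1)

theorem foldA_eq (l : List String) : ∀ (acc : List Nat) (i : Nat),
    (l.foldl (fun (s : List Nat × Nat) row =>
      (if row = " " then s.1 ++ [s.2] else s.1, s.2 + 1)) (acc, i)).1 = acc ++ idxSpec l i := by
  induction l with
  | nil => simp [idxSpec]
  | cons x xs ih =>
    intro acc i
    simp only [List.foldl_cons, idxSpec]
    split <;> simp [ih]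

theorem idxSpec_succ (l : List String) : ∀ i, idxSpec l (i + 1) = (idxSpec l i).map (· + 1) := by
  induction l with
  | nil => intro i; simp [idxSpec]
  | cons x xs ih => intro i; simp only [idxSpec, List.map_append, ih]; split <;> simp

theorem erase_shift (ns : List Nat) : ∀ (x : String) (l : List String),
    (ns.map (· + 1)).foldl (fun l n => l.eraseIdx n) (x :: l)
      = x :: ns.foldl (fun l n => l.eraseIdx n) l := by
  induction ns with
  | nil => intro x l; simp
  | cons n ns ih => intro x l; simp [List.eraseIdx_cons_succ, ih]

theorem A_filter (l : List String) :
    (idxSpec l 0).reverse.foldl (fun l n => l.eraseIdx n) l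
      = l.filter (fun x => x ≠ " ") := by
  induction l with
  | nil => simp [idxSpec]
  | cons x xs ih =>
    simp only [idxSpec]
    by_cases hx : x = " "
    · subst hx
      simp only [idxSpec_succ, List.reverse_append,
        List.foldl_append, ← List.map_reverse, erase_shift, ih]
      simp
    · simp only [if_neg hx, idxSpec_succ, List.nil_append, ← List.map_reverse,
        erase_shift, ih]
      simp [hx]

theorem B_inv (data : List String) : ∀ r, r ≤ data.length →
    let s := (List.range r).foldl compactStep (data, 0)
    s.2 ≤ r ∧ s.1.length = data.length ∧
      s.1.take s.2 = (data.take r).filter (fun x => x ≠ " ") ∧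
      s.1.drop r = data.drop r := by
  intro r
  induction r with
  | zero => intro _; simp
  | succ r ih =>
    intro hr
    have hr' : r ≤ data.length := Nat.le_of_succ_le hr
    obtain ⟨hw, hlen, htake, hdrop⟩ := ih hr'
    set s := (List.range r).foldl compactStep (data, 0) with hs
    have hrange : (List.range (r + 1)).foldl compactStep (data, 0) = compactStep s r := by
      rw [List.range_succ, List.foldl_append, ← hs]; rfl
    have hrlt : r < data.length := hr
    have hget : s.1.getD r "" = data[r]'hrlt := by
      have h0 : s.1[r]? = data[r]? := by
        have := congrArg (fun l => l[0]?) hdrop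
        simpa [List.getElem?_drop] using this
      simp [List.getD_eq_getElem?_getD, h0, List.getElem?_eq_getElem hrlt]
    have hwlt : s.2 < s.1.length := by omega
    have htaker : data.take (r + 1) = data.take r ++ [data[r]'hrlt] := by
      rw [List.take_add_one, List.getElem?_eq_getElem hrlt]; rfl
    have hdropr : ∀ (l : List String), l.drop (r + 1) = (l.drop r).drop 1 := by
      intro l; rw [List.drop_drop]
    simp only [hrange, compactStep, hget]
    by_cases hv : data[r]'hrlt = " "
    · simp only [hv, ne_eq, not_true_eq_false, if_false]
      refine ⟨by omega, hlen, ?_, ?_⟩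
      · rw [htake, htaker, List.filter_append]
        simp [hv]
      · rw [hdropr, hdrop, ← hdropr]
    · simp only [ne_eq, hv, not_false_eq_true, if_true]
      refine ⟨by omega, by simp [hlen], ?_, ?_⟩
      · have h1 : (s.1.set s.2 (data[r]'hrlt)).take (s.2 + 1)
            = s.1.take s.2 ++ [data[r]'hrlt] := by
          rw [List.take_add_one, List.getElem?_set_self hwlt, List.take_set,
            List.set_eq_of_length_le (by simp [Nat.min_eq_left (Nat.le_of_lt hwlt)])]
          rfl
        rw [h1, htake, htaker, List.filter_append]
        simp [hv]
      · have h2 : (s.1.set s.2 (data[r]'hrlt)).drop (r + 1) = s.1.drop (r + 1) := by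
          rw [List.drop_set, if_pos (by omega)]
        rw [h2, hdropr, hdrop, ← hdropr]

theorem B_filter (data : List String) :
    updateRows_alt data = padTo7 (data.filter (fun x => x ≠ " ")) := by
  obtain ⟨hw, hlen, htake, _⟩ := B_inv data data.length le_rfl
  simp only [updateRows_alt]
  rw [htake, List.take_length]

-- ===== VERDICT (by name: the statement is the Claim_ definition above) =====
theorem updateRows_spec : Claim_equal_updateRows := by
  intro data _
  show updateRows data = updateRows_alt data
  rw [B_filter]
  simp only [updateRows, foldA_eq, List.nil_append, A_filter]
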